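-- pv_equiv track=rewrite | github.com/redfast00/aoc2024 | day_14/solve.py | display
-- ===== SOURCE A (Python) =====
-- GRID = (101, 103)
--
-- def display(robots, simulation_time):
--     coords = set()
--     for ((rx, ry), (dx, dy)) in robots:
--         nx = (rx + simulation_time*dx) % GRID[0]
--         ny = (ry + simulation_time*dy) % GRID[1]
--         coords.add((nx, ny))
--     for y in range(GRID[1]):
--         sequential = 0
--         sequential_max = 0
--         for x in range(GRID[0]):
--             if (x, y) in coords:
--                 sequential += 1
--                 sequential_max = max(sequential_max, sequential)
--             else:
--                 sequential = 0
--         if sequential_max > 10: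
--             return True
--     return False
-- ===== SOURCE B (Python) =====
-- GRID = (101, 103)
--
--
-- def display(robots, simulation_time):
--     coords = set()
--     for ((rx, ry), (dx, dy)) in robots:
--         coords.add(((rx + simulation_time * dx) % GRID[0],
--                     (ry + simulation_time * dy) % GRID[1]))
--     # a run of more than 10 consecutive robots exists iff some robot starts
--     # an 11-long horizontal block of occupied cells
--     return any(all((x + i, y) in coords for i in range(1, 11))
--                for (x, y) in coords)
-- ===== Notes on version B (the rewrite author's own statement) =====
-- stated objective: alternative
-- what changed: Instead of scanning all 101x103 grid cells per row with a run counter, B checks for each robot's final position whether it starts an 11-long horizontal block via set lookups, so detection work depends only on the number of robots.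
import Mathlib
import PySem

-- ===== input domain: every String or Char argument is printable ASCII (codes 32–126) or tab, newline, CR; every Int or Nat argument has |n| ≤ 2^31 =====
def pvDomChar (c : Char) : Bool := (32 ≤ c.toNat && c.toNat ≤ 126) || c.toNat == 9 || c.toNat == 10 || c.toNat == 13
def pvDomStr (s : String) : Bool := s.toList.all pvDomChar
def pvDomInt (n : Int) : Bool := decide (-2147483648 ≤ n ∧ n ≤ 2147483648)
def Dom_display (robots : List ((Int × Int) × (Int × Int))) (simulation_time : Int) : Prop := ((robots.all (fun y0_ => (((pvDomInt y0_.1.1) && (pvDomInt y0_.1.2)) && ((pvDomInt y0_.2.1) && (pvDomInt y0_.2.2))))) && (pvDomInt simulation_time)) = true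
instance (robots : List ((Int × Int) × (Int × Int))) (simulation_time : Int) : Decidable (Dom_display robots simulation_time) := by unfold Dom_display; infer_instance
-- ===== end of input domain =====

-- B replaces A's full 101×103 grid scan with, per final robot position, an 11-cell
-- window check by set lookup, so detection cost depends only on the robot count.

-- ===== PORT A =====
-- coords = set(); for ((rx,ry),(dx,dy)) in robots: coords.add(((rx+t*dx)%101, (ry+t*dy)%103))
def buildCoordsA (robots : List ((Int × Int) × (Int × Int))) (simulation_time : Int) :
    PySem.Set (Int × Int) :=
  robots.foldl (fun s r =>
    PySem.Set.add s
      (PySem.Int.mod (r.1.1 + simulation_time * r.2.1) 101,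
       PySem.Int.mod (r.1.2 + simulation_time * r.2.2) 103))
    PySem.Set.empty

-- the inner 'for x in range(GRID[0])' loop; state = (sequential, sequential_max)
def rowScanA (coords : PySem.Set (Int × Int)) (y : Int) : Int :=
  ((PySem.List.pyRange 0 101 1).foldl
    (fun (p : Int × Int) x =>
      if PySem.Set.contains coords (x, y) then (p.1 + 1, max p.2 (p.1 + 1)) else (0, p.2))
    (0, 0)).2

-- the outer 'for y in range(GRID[1])' loop with its early 'return True'
def displayLoopA (coords : PySem.Set (Int × Int)) : List Int → Bool
  | [] => false
  | y :: ys => if rowScanA coords y > 10 then true else displayLoopA coords ys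

def display (robots : List ((Int × Int) × (Int × Int))) (simulation_time : Int) : Bool :=
  displayLoopA (buildCoordsA robots simulation_time) (PySem.List.pyRange 0 103 1)

-- ===== PORT B =====
def buildCoordsB (robots : List ((Int × Int) × (Int × Int))) (simulation_time : Int) :
    PySem.Set (Int × Int) :=
  robots.foldl (fun s r =>
    PySem.Set.add s
      (PySem.Int.mod (r.1.1 + simulation_time * r.2.1) 101,
       PySem.Int.mod (r.1.2 + simulation_time * r.2.2) 103))
    PySem.Set.empty

-- any(all((x+i, y) in coords for i in range(1, 11)) for (x, y) in coords)
def display_alt (robots : List ((Int × Int) × (Int × Int))) (simulation_time : Int) : Bool :=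
  let coords := buildCoordsB robots simulation_time
  coords.any (fun p =>
    (PySem.List.pyRange 1 11 1).all (fun i => PySem.Set.contains coords (p.1 + i, p.2)))

-- ===== PRECONDITION & SPEC =====
def Spec_display (robots : List ((Int × Int) × (Int × Int))) (simulation_time : Int) (out : Bool) : Prop := out = display_alt robots simulation_time
instance (robots : List ((Int × Int) × (Int × Int))) (simulation_time : Int) (out : Bool) : Decidable (Spec_display robots simulation_time out) := by unfold Spec_display; infer_instance

-- ===== CLAIM (what is proved, stated in full; the proofs are below) =====
def Claim_equal_display : Prop := ∀ (robots : List ((Int × Int) × (Int × Int))) (simulation_time : Int), Dom_display robots simulation_time → Spec_display robots simulation_time (display robots simulation_time)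

-- ===== LEMMAS AND PROOFS =====

-- length of the run of occupied cells ending just before index k
def trail (f : Nat → Bool) : Nat → Nat
  | 0 => 0
  | k + 1 => if f k then trail f k + 1 else 0

-- maximal run length among the first k cells
def runmax (f : Nat → Bool) : Nat → Nat
  | 0 => 0
  | k + 1 => max (runmax f k) (trail f (k + 1))

theorem fold_eq_trail_runmax (coords : PySem.Set (Int × Int)) (y : Int) (n : Nat) :
    ((List.range n).map (fun k : Nat => (k : Int))).foldl
      (fun (p : Int × Int) x =>
        if PySem.Set.contains coords (x, y) then (p.1 + 1, max p.2 (p.1 + 1)) else (0, p.2))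
      (0, 0)
    = ((trail (fun k => PySem.Set.contains coords ((k : Int), y)) n : Int),
       (runmax (fun k => PySem.Set.contains coords ((k : Int), y)) n : Int)) := by
  induction n with
  | zero => simp [trail, runmax]
  | succ n ih =>
      rw [List.range_succ, List.map_append, List.foldl_append, ih]
      simp only [List.map_cons, List.map_nil, List.foldl_cons, List.foldl_nil]
      by_cases h : ((n : Int), y) ∈ coords
      · simp [h, trail, runmax, Nat.cast_max]
      · simp [h, trail, runmax]

theorem trail_ge_inv (f : Nat → Bool) (k : Nat) :
    ∀ m, m ≤ trail f k → m ≤ k ∧ ∀ j < m, f (k - m + j) = true := by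
  induction k with
  | zero => intro m hm; simp [trail] at hm; subst hm; exact ⟨Nat.le_refl 0, by omega⟩
  | succ k ih =>
      intro m hm
      by_cases hf : f k = true
      · simp only [trail, hf, if_pos] at hm
        rcases Nat.eq_zero_or_pos m with h0 | h1
        · subst h0; exact ⟨Nat.zero_le _, by omega⟩
        · have hm' : m - 1 ≤ trail f k := by omega
          obtain ⟨hk, hall⟩ := ih (m - 1) hm'
          refine ⟨by omega, ?_⟩
          intro j hj
          rcases Nat.lt_or_ge j (m - 1) with hlt | hge
          · have := hall j hlt
            have harg : k + 1 - m + j = k - (m - 1) + j := by omega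
            rw [harg]; exact this
          · have hj' : j = m - 1 := by omega
            have harg : k + 1 - m + j = k := by omega
            rw [harg]; exact hf
      · simp only [trail, hf, if_neg, Bool.false_eq_true, not_false_iff] at hm
        have h0 : m = 0 := by omega
        subst h0; exact ⟨Nat.zero_le _, by omega⟩

theorem trail_ge_of (f : Nat → Bool) (k : Nat) :
    ∀ m, m ≤ k → (∀ j < m, f (k - m + j) = true) → m ≤ trail f k := by
  induction k with
  | zero => intro m hm _; omega
  | succ k ih =>
      intro m hm hall
      rcases Nat.eq_zero_or_pos m with h0 | h1
      · omega
      · have hfk : f k = true := by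
          have := hall (m - 1) (by omega)
          have harg : k + 1 - m + (m - 1) = k := by omega
          rwa [harg] at this
        have hrec : m - 1 ≤ trail f k := by
          apply ih (m - 1) (by omega)
          intro j hj
          have := hall j (by omega)
          have harg : k + 1 - m + j = k - (m - 1) + j := by omega
          rwa [harg] at this
        simp only [trail, hfk, if_pos]
        omega

theorem runmax_gt_iff (f : Nat → Bool) (n : Nat) :
    10 < runmax f n ↔ ∃ k ≤ n, 10 < trail f k := by
  induction n with
  | zero =>
      simp only [runmax]
      constructor
      · omega
      · rintro ⟨k, hk, ht⟩
        have : k = 0 := by omega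
        subst this; simp [trail] at ht
  | succ n ih =>
      simp only [runmax]
      constructor
      · intro h
        rcases Nat.lt_or_ge 10 (runmax f n) with h1 | h1
        · obtain ⟨k, hk, ht⟩ := ih.mp h1
          exact ⟨k, by omega, ht⟩
        · refine ⟨n + 1, Nat.le_refl _, ?_⟩
          omega
      · rintro ⟨k, hk, ht⟩
        rcases Nat.lt_or_ge k (n + 1) with h1 | h1
        · have : 10 < runmax f n := ih.mpr ⟨k, by omega, ht⟩
          omega
        · have : k = n + 1 := by omega
          subst this; omega

-- the run characterisation: 10 < runmax f n ↔ an 11-window of trues fits before n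
theorem runmax_gt10 (f : Nat → Bool) (n : Nat) :
    10 < runmax f n ↔ ∃ s, s + 11 ≤ n ∧ ∀ j < 11, f (s + j) = true := by
  rw [runmax_gt_iff]
  constructor
  · rintro ⟨k, hk, ht⟩
    obtain ⟨hle, hall⟩ := trail_ge_inv f k 11 (by omega)
    refine ⟨k - 11, by omega, ?_⟩
    exact hall
  · rintro ⟨s, hs, hall⟩
    refine ⟨s + 11, by omega, ?_⟩
    have : 11 ≤ trail f (s + 11) := by
      apply trail_ge_of f (s + 11) 11 (by omega)
      intro j hj
      have harg : s + 11 - 11 + j = s + j := by omega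
      rw [harg]; exact hall j hj
    omega

-- membership/bounds of the built coordinate set
theorem mem_buildCoords (robots : List ((Int × Int) × (Int × Int))) (t : Int)
    (p : Int × Int) (hp : p ∈ buildCoordsA robots t) :
    0 ≤ p.1 ∧ p.1 < 101 ∧ 0 ≤ p.2 ∧ p.2 < 103 := by
  unfold buildCoordsA at hp
  rw [PySem.Set.mem_foldl_add] at hp
  rcases hp with h | ⟨r, _, rfl⟩
  · simp [PySem.Set.empty] at h
  · have h1 : PySem.Int.mod (r.1.1 + t * r.2.1) 101 = (r.1.1 + t * r.2.1) % 101 :=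
      PySem.Int.mod_eq_emod_of_pos (by norm_num)
    have h2 : PySem.Int.mod (r.1.2 + t * r.2.2) 103 = (r.1.2 + t * r.2.2) % 103 :=
      PySem.Int.mod_eq_emod_of_pos (by norm_num)
    simp only [h1, h2]
    exact ⟨Int.emod_nonneg _ (by norm_num), Int.emod_lt_of_pos _ (by norm_num),
      Int.emod_nonneg _ (by norm_num), Int.emod_lt_of_pos _ (by norm_num)⟩

theorem buildCoords_eq (robots : List ((Int × Int) × (Int × Int))) (t : Int) :
    buildCoordsB robots t = buildCoordsA robots t := rfl

theorem displayLoopA_eq_any (coords : PySem.Set (Int × Int)) (ys : List Int) :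
    displayLoopA coords ys = ys.any (fun y => decide (rowScanA coords y > 10)) := by
  induction ys with
  | nil => rfl
  | cons y ys ih =>
      simp only [displayLoopA, List.any_cons, ← ih]
      by_cases h : rowScanA coords y > 10
      · simp [h]
      · simp [h]

theorem rowScanA_gt10 (coords : PySem.Set (Int × Int)) (y : Int) :
    rowScanA coords y > 10 ↔
      ∃ s : Nat, s + 11 ≤ 101 ∧ ∀ j < 11, PySem.Set.contains coords (((s + j : Nat) : Int), y) = true := by
  unfold rowScanA
  have hr : PySem.List.pyRange 0 101 1 = (List.range 101).map (fun k : Nat => (k : Int)) := by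
    rw [PySem.List.pyRange_one]
    simp
  rw [hr, fold_eq_trail_runmax]
  simp only []
  constructor
  · intro h
    have h10 : 10 < runmax (fun k => PySem.Set.contains coords ((k : Int), y)) 101 := by
      exact_mod_cast h
    exact (runmax_gt10 _ 101).mp h10
  · intro h
    have h10 : 10 < runmax (fun k => PySem.Set.contains coords ((k : Int), y)) 101 :=
      (runmax_gt10 _ 101).mpr h
    exact_mod_cast h10

-- A is true iff some cell of coords starts an 11-long horizontal occupied block
theorem display_iff (robots : List ((Int × Int) × (Int × Int))) (t : Int) :
    display robots t = display_alt robots t := by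
  unfold display display_alt
  rw [buildCoords_eq]
  set coords := buildCoordsA robots t with hc
  rw [displayLoopA_eq_any, Bool.eq_iff_iff]
  simp only [List.any_eq_true, List.all_eq_true, PySem.List.mem_pyRange_one,
    decide_eq_true_eq]
  constructor
  · rintro ⟨y, hy, hrow⟩
    obtain ⟨s, hs, hall⟩ := (rowScanA_gt10 coords y).mp hrow
    have h0 : PySem.Set.contains coords (((s : Nat) : Int), y) = true := by
      have := hall 0 (by omega); simpa using this
    refine ⟨(((s : Nat) : Int), y), ?_, ?_⟩
    · exact (PySem.Set.contains_iff _ _).mp h0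
    · intro i hi
      have hj : i.toNat < 11 := by omega
      have := hall i.toNat hj
      have harg : (((s + i.toNat : Nat) : Int)) = ((s : Nat) : Int) + i := by
        push_cast; omega
      rwa [harg] at this
  · rintro ⟨p, hp, hall⟩
    obtain ⟨hx0, hx1, hy0, hy1⟩ := mem_buildCoords robots t p hp
    refine ⟨p.2, ⟨hy0, hy1⟩, ?_⟩
    -- the cell (x+10, y) is occupied, hence x+10 < 101
    have h10 : PySem.Set.contains coords (p.1 + 10, p.2) = true := hall 10 (by omega)
    have hx10 : p.1 + 10 < 101 := by
      have hmem := (PySem.Set.contains_iff _ _).mp h10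
      have := mem_buildCoords robots t (p.1 + 10, p.2) hmem
      simpa using this.2.1
    rw [rowScanA_gt10]
    refine ⟨p.1.toNat, by omega, ?_⟩
    intro j hj
    rcases Nat.eq_zero_or_pos j with h0 | h1
    · subst h0
      apply (PySem.Set.contains_iff _ _).mpr
      have hxx : (((p.1.toNat + 0 : Nat) : Int)) = p.1 := by omega
      rw [hxx, Prod.mk.eta]
      exact hp
    · apply (PySem.Set.contains_iff _ _).mpr
      have := hall (j : Int) (by constructor <;> omega)
      have harg : p.1 + (j : Int) = (((p.1.toNat + j : Nat) : Int)) := by push_cast; omega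
      rw [harg] at this
      exact (PySem.Set.contains_iff _ _).mp this

-- ===== VERDICT (by name: the statement is the Claim_ definition above) =====
theorem display_spec : Claim_equal_display := by
  intro robots t _
  unfold Spec_display
  exact display_iff robots t
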